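-- pv_equiv track=rewrite | github.com/GanquanWen/Handwritten-Chinese-Sentence-Recognition-and-Classification | Sentence_Segmentation/segmentation.py | get_sentence_height
-- ===== SOURCE A (Python) =====
-- def get_sentence_height(vertical):
--     start_point = None
--     end_point = None
--     for i, y in enumerate(vertical):
--         if y > 1 and start_point is None:
--             start_point = i
--         elif y > 1 and start_point is not None:
--             pass
--         elif y <= 1 and start_point is not None and end_point is None:
--             end_point = i
--             return end_point - start_point
--         else:
--             pass
--     if end_point is None and start_point is not None:
--         end_point = len(vertical) - 1
--     return end_point - start_point + 1
-- ===== SOURCE B (Python) =====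
-- def get_sentence_height(vertical):
--     runs = []
--     for y in vertical:
--         flag = y > 1
--         if runs and runs[-1][0] == flag:
--             runs[-1][1] += 1
--         else:
--             runs.append([flag, 1])
--     return next(length for flag, length in runs if flag)
-- ===== Notes on version B (the rewrite author's own statement) =====
-- stated objective: alternative
-- what changed: B builds a run-length encoding (flag, count) of the whole list in one fold and returns the count of the first True run, instead of A's start/end index state machine returning an index difference.
import Mathlib
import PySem

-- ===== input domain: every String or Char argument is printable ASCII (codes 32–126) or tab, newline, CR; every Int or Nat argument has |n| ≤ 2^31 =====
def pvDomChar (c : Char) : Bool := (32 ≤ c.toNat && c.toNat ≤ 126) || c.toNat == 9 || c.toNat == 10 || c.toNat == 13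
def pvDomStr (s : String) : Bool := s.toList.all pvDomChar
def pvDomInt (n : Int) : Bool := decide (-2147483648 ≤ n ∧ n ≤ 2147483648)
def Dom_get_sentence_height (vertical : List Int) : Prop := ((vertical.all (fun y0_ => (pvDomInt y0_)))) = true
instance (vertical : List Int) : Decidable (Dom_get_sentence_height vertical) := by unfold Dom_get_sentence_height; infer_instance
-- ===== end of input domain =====

-- B builds a run-length encoding (flag, count) of the whole list in one fold and
-- returns the count of the first True run, instead of A's index state machine
-- returning an index difference (alternative decomposition; same O(n) cost).
-- Both A and B raise (TypeError resp. StopIteration) when no element exceeds 1;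
-- Pre_ excludes exactly those inputs.

-- ===== PORT A =====
-- enumerate(vertical) with an Int index
def pvEnumI : Int → List Int → List (Int × Int)
  | _, [] => []
  | n, y :: ys => (n, y) :: pvEnumI (n + 1) ys

-- the for-loop: state = start_point (end_point is only ever set at the early return);
-- .inl r = the early 'return end_point - start_point' with value r, .inr s = loop fell through with start_point = s
def pvA_loop : List (Int × Int) → Option Int → Sum Int (Option Int)
  | [], s => Sum.inr s
  | (i, y) :: rest, s =>
    if y > 1 ∧ s = none then pvA_loop rest (some i)
    else if y > 1 ∧ s ≠ none then pvA_loop rest s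
    else if y ≤ 1 ∧ s ≠ none then Sum.inl (i - s.getD 0)  -- end_point = i; return end_point - start_point
    else pvA_loop rest s

def get_sentence_height (vertical : List Int) : Int :=
  match pvA_loop (pvEnumI 0 vertical) none with
  | Sum.inl r => r
  | Sum.inr (some sp) => ((vertical.length : Int) - 1) - sp + 1  -- end_point := len-1; return end-start+1
  | Sum.inr none => 0  -- Python raises TypeError here (None - None); excluded by Pre_

-- ===== PORT B =====
-- one step of the run-length-encoding loop: extend the last run or open a new one
def pvStep (runs : List (Bool × Int)) (y : Int) : List (Bool × Int) :=
  let f := decide (y > 1)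
  match runs.getLast? with
  | some (g, c) => if g = f then runs.dropLast ++ [(g, c + 1)] else runs ++ [(f, 1)]
  | none => [(f, 1)]

def get_sentence_height_alt (vertical : List Int) : Int :=
  match (vertical.foldl pvStep []).find? (fun p => p.1) with
  | some p => p.2
  | none => 0  -- Python raises StopIteration here; excluded by Pre_

-- ===== PRECONDITION & SPEC =====
-- Pre_: some element exceeds 1 (otherwise Python A raises TypeError, B StopIteration)
def Pre_get_sentence_height (vertical : List Int) : Prop := ∃ y ∈ vertical, y > 1
instance (vertical : List Int) : Decidable (Pre_get_sentence_height vertical) := by unfold Pre_get_sentence_height; infer_instance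
def pvWitness_get_sentence_height : List Int := [0, 2, 2, 0, 3]
def Spec_get_sentence_height (vertical : List Int) (out : Int) : Prop := out = get_sentence_height_alt vertical
instance (vertical : List Int) (out : Int) : Decidable (Spec_get_sentence_height vertical out) := by unfold Spec_get_sentence_height; infer_instance

-- ===== CLAIM =====
def Claim_equal_get_sentence_height : Prop := ∀ (vertical : List Int), Dom_get_sentence_height vertical → Pre_get_sentence_height vertical → Spec_get_sentence_height vertical (get_sentence_height vertical)

-- ===== LEMMAS AND PROOFS =====

-- length of the leading run of values > 1
def pvCnt : List Int → Int
  | [] => 0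
  | y :: ys => if y > 1 then 1 + pvCnt ys else 0

-- length of the first maximal run of values > 1, if any (common spec of both ports)
def pvFirstRun : List Int → Option Int
  | [] => none
  | y :: ys => if y > 1 then some (1 + pvCnt ys) else pvFirstRun ys

-- ----- A side -----

-- once start_point = some sp, the loop returns inl (n + k - sp) for k the first index ≤ 1, else falls through with sp
theorem pvA_loop_some (xs : List Int) : ∀ (n sp : Int),
    pvA_loop (pvEnumI n xs) (some sp) =
      match xs.findIdx? (fun y => decide (y ≤ 1)) with
      | some k => Sum.inl (n + (k : Int) - sp)
      | none => Sum.inr (some sp) := by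
  induction xs with
  | nil => intro n sp; simp [pvEnumI, pvA_loop]
  | cons y ys ih =>
    intro n sp
    by_cases hy : y > 1
    · have hy' : ¬ y ≤ 1 := by omega
      simp [pvEnumI, pvA_loop, hy, hy', List.findIdx?_cons, ih]
      cases h : ys.findIdx? (fun y => decide (y ≤ 1)) with
      | none => simp
      | some k => simp; ring
    · have hy' : y ≤ 1 := by omega
      simp [pvEnumI, pvA_loop, hy, hy', List.findIdx?_cons]

-- before a start is found: characterise the whole loop by the first index > 1
theorem pvA_loop_none (xs : List Int) : ∀ (n : Int),
    pvA_loop (pvEnumI n xs) none =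
      match xs.findIdx? (fun y => decide (y > 1)) with
      | none => Sum.inr none
      | some j =>
        match (xs.drop (j + 1)).findIdx? (fun y => decide (y ≤ 1)) with
        | some k => Sum.inl ((k : Int) + 1)
        | none => Sum.inr (some (n + (j : Int))) := by
  induction xs with
  | nil => intro n; simp [pvEnumI, pvA_loop]
  | cons y ys ih =>
    intro n
    by_cases hy : y > 1
    · simp [pvEnumI, pvA_loop, hy, List.findIdx?_cons, pvA_loop_some]
      cases h : ys.findIdx? (fun y => decide (y ≤ 1)) with
      | none => simp
      | some k => simp; ring
    · have hy' : y ≤ 1 := by omega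
      simp [pvEnumI, pvA_loop, hy, hy', List.findIdx?_cons, ih]
      cases h : ys.findIdx? (fun y => decide (y > 1)) with
      | none => simp
      | some j =>
        simp
        cases h2 : (ys.drop (j + 1)).findIdx? (fun y => decide (y ≤ 1)) with
        | none => simp; ring
        | some k => simp

-- pvCnt via the first index ≤ 1
theorem pvCnt_char (xs : List Int) :
    pvCnt xs = match xs.findIdx? (fun y => decide (y ≤ 1)) with
      | some k => (k : Int)
      | none => (xs.length : Int) := by
  induction xs with
  | nil => simp [pvCnt]
  | cons y ys ih =>
    by_cases hy : y > 1
    · have hy' : ¬ y ≤ 1 := by omega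
      simp only [pvCnt, if_pos hy, List.findIdx?_cons, decide_eq_true_eq, hy', decide_false,
        Bool.false_eq_true, if_neg, ih]
      cases h : ys.findIdx? (fun y => decide (y ≤ 1)) with
      | none => simp [h]; push_cast; ring
      | some k => simp [h]; push_cast; ring
    · have hy' : y ≤ 1 := by omega
      simp [pvCnt, hy, hy', List.findIdx?_cons]

-- pvFirstRun via the first index > 1
theorem pvFirstRun_char (xs : List Int) :
    pvFirstRun xs = match xs.findIdx? (fun y => decide (y > 1)) with
      | none => none
      | some j => some (1 + pvCnt (xs.drop (j + 1))) := by
  induction xs with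
  | nil => simp [pvFirstRun]
  | cons y ys ih =>
    by_cases hy : y > 1
    · simp [pvFirstRun, hy, List.findIdx?_cons]
    · simp only [pvFirstRun, if_neg hy, List.findIdx?_cons, decide_eq_true_eq, hy, decide_false,
        Bool.false_eq_true, if_neg, ih]
      cases h : ys.findIdx? (fun y => decide (y > 1)) with
      | none => simp [h]
      | some j => simp [h]

-- A's value equals the first >1 run length
theorem pvA_char (xs : List Int) :
    pvFirstRun xs ≠ none → get_sentence_height xs = (pvFirstRun xs).getD 0 := by
  intro h
  unfold get_sentence_height
  rw [pvA_loop_none]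
  rw [pvFirstRun_char] at h ⊢
  cases hj : xs.findIdx? (fun y => decide (y > 1)) with
  | none => rw [hj] at h; simp at h
  | some j =>
    have hjlt : j < xs.length := (List.findIdx?_eq_some_iff_getElem.mp hj).1
    cases h2 : (xs.drop (j + 1)).findIdx? (fun y => decide (y ≤ 1)) with
    | some k =>
      simp [pvCnt_char, h2]
      ring
    | none =>
      simp [pvCnt_char, h2, List.length_drop]
      push_cast [Nat.cast_sub (by omega : j + 1 ≤ xs.length)]
      ring

-- ----- B side -----

-- the fold consumes one whole run at a time
theorem pvFold_run (xs : List Int) : ∀ (pre : List (Bool × Int)) (b : Bool) (c : Int),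
    List.foldl pvStep (pre ++ [(b, c)]) xs =
      List.foldl pvStep
        (pre ++ [(b, c + ((xs.takeWhile (fun z => decide (z > 1) == b)).length : Int))])
        (xs.dropWhile (fun z => decide (z > 1) == b)) := by
  induction xs with
  | nil => simp
  | cons y ys ih =>
    intro pre b c
    by_cases hf : decide (y > 1) = b
    · have step : pvStep (pre ++ [(b, c)]) y = pre ++ [(b, c + 1)] := by
        simp [pvStep, hf]
      have hp : ((fun z => decide (z > 1) == b) y) = true := by simp [hf]
      rw [List.foldl_cons, step, ih pre b (c + 1)]
      simp only [List.takeWhile_cons, List.dropWhile_cons, hp, if_true]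
      simp only [List.length_cons]
      push_cast
      ring_nf
    · have hfb : ¬ b = decide (y > 1) := fun hh => hf hh.symm
      have step : pvStep (pre ++ [(b, c)]) y = (pre ++ [(b, c)]) ++ [(decide (y > 1), 1)] := by
        simp [pvStep, hfb]
      have hp : ((fun z => decide (z > 1) == b) y) = false := by simp [hf]
      simp only [List.takeWhile_cons, List.dropWhile_cons, hp, if_false, Bool.false_eq_true]
      simp

-- dropping a leading ≤1 block does not change the first >1 run
theorem pvFirstRun_dw (xs : List Int) :
    pvFirstRun (xs.dropWhile (fun z => !decide (z > 1))) = pvFirstRun xs := by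
  induction xs with
  | nil => simp
  | cons y ys ih =>
    by_cases hy : y > 1
    · have hp : ((fun z => !decide (z > 1)) y) = false := by simp [hy]
      simp only [List.dropWhile_cons, hp, if_false, Bool.false_eq_true]
    · have hp : ((fun z => !decide (z > 1)) y) = true := by simp [hy]
      simp only [List.dropWhile_cons, hp, if_true]
      rw [ih]
      simp [pvFirstRun, hy]

-- pvCnt is the length of the leading >1 run
theorem pvCnt_tw (xs : List Int) :
    pvCnt xs = ((xs.takeWhile (fun z => decide (z > 1))).length : Int) := by
  induction xs with
  | nil => simp [pvCnt]
  | cons y ys ih =>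
    by_cases hy : y > 1
    · simp [pvCnt, hy, ih]; ring
    · simp [pvCnt, hy]

-- main fold invariant: when the pending element cannot extend the open run
theorem pvFold_find_aux : ∀ (n : Nat) (xs : List Int) (pre : List (Bool × Int)) (b : Bool) (c : Int),
    xs.length ≤ n →
    (∀ z, xs.head? = some z → decide (z > 1) ≠ b) →
    (List.foldl pvStep (pre ++ [(b, c)]) xs).find? (fun p => p.1) =
      ((pre ++ [(b, c)]).find? (fun p => p.1)).or ((pvFirstRun xs).map (fun r => (true, r))) := by
  intro n
  induction n with
  | zero =>
    intro xs pre b c hlen _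
    have : xs = [] := List.eq_nil_of_length_eq_zero (Nat.le_zero.mp hlen)
    subst this
    simp [pvFirstRun]
  | succ n ih =>
    intro xs pre b c hlen hhead
    cases xs with
    | nil => simp [pvFirstRun]
    | cons z zs =>
      have hz : decide (z > 1) ≠ b := hhead z rfl
      have hzb : ¬ b = decide (z > 1) := fun hh => hz hh.symm
      have step : pvStep (pre ++ [(b, c)]) z = (pre ++ [(b, c)]) ++ [(decide (z > 1), 1)] := by
        simp [pvStep, hzb]
      rw [List.foldl_cons, step, pvFold_run]
      rw [ih (zs.dropWhile (fun w => decide (w > 1) == decide (z > 1)))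
            (pre ++ [(b, c)]) (decide (z > 1)) _
            (by
              have := List.length_dropWhile_le (fun w => decide (w > 1) == decide (z > 1)) zs
              simp at hlen; omega)
            (by
              intro w hw hwb
              have := List.head?_dropWhile_not (fun w => decide (w > 1) == decide (z > 1)) zs
              rw [hw] at this
              simp [hwb] at this)]
      rw [List.find?_append, Option.or_assoc]
      by_cases hzgt : z > 1
      · have hf : decide (z > 1) = true := by simp [hzgt]
        rw [hf]
        have hfr : pvFirstRun (z :: zs) = some (1 + pvCnt zs) := by simp [pvFirstRun, hzgt]
        rw [hfr]
        simp [pvCnt_tw]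
      · have hf : decide (z > 1) = false := by simp [hzgt]
        rw [hf]
        have hfr : pvFirstRun (z :: zs) = pvFirstRun zs := by simp [pvFirstRun, hzgt]
        rw [hfr]
        have hdw : (zs.dropWhile (fun w => decide (w > 1) == false))
            = zs.dropWhile (fun w => !decide (w > 1)) := by
          simp
        rw [hdw, pvFirstRun_dw]
        simp

-- the RLE fold's first True run is pvFirstRun
theorem pvFold_find (xs : List Int) :
    (List.foldl pvStep [] xs).find? (fun p => p.1) = (pvFirstRun xs).map (fun r => (true, r)) := by
  cases xs with
  | nil => simp [pvFirstRun]
  | cons y ys =>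
    have step : pvStep [] y = [] ++ [(decide (y > 1), 1)] := by simp [pvStep]
    rw [List.foldl_cons, step, pvFold_run]
    rw [pvFold_find_aux ys.length (ys.dropWhile (fun w => decide (w > 1) == decide (y > 1)))
          [] (decide (y > 1)) _
          (List.length_dropWhile_le _ ys)
          (by
            intro w hw hwb
            have := List.head?_dropWhile_not (fun w => decide (w > 1) == decide (y > 1)) ys
            rw [hw] at this
            simp [hwb] at this)]
    by_cases hy : y > 1
    · have hf : decide (y > 1) = true := by simp [hy]
      rw [hf]
      have hfr : pvFirstRun (y :: ys) = some (1 + pvCnt ys) := by simp [pvFirstRun, hy]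
      rw [hfr]
      simp [pvCnt_tw]
    · have hf : decide (y > 1) = false := by simp [hy]
      rw [hf]
      have hfr : pvFirstRun (y :: ys) = pvFirstRun ys := by simp [pvFirstRun, hy]
      rw [hfr]
      have hdw : (ys.dropWhile (fun w => decide (w > 1) == false))
          = ys.dropWhile (fun w => !decide (w > 1)) := by
        simp
      rw [hdw, pvFirstRun_dw]
      simp

-- B's value equals the first >1 run length
theorem pvB_char (xs : List Int) :
    pvFirstRun xs ≠ none → get_sentence_height_alt xs = (pvFirstRun xs).getD 0 := by
  intro h
  unfold get_sentence_height_alt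
  rw [pvFold_find]
  cases hr : pvFirstRun xs with
  | none => exact absurd hr h
  | some r => simp

-- ===== VERDICT =====
theorem get_sentence_height_spec : Claim_equal_get_sentence_height := by
  intro vertical _ hpre
  unfold Spec_get_sentence_height
  have h : pvFirstRun vertical ≠ none := by
    rw [pvFirstRun_char]
    cases hj : vertical.findIdx? (fun y => decide (y > 1)) with
    | none =>
      obtain ⟨y, hmem, hy⟩ := hpre
      have := List.findIdx?_eq_none_iff.mp hj y hmem
      simp [hy] at this
    | some j => simp
  rw [pvA_char vertical h, pvB_char vertical h]
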